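-- pv_equiv track=rewrite | github.com/kisapapa1227/ReTReKpy | make_reports/statDb.py | xmerge
-- ===== SOURCE A (Python) =====
-- def xmerge(src):
--     hand=False;cc=""
--     if len(src)<1:
--         return "Non"
--     if len(src)==2:
--         return src[0]+"-"+src[1]
--     p=""
--     for s in src:
--         match s:
--             case '(':
--                 hand=False;cc=cc+s
--             case ')':
--                 hand=False;cc=cc+s
--             case '=':
--                 hand=False;cc=cc+s
--             case '.':
--                 hand=False;cc=cc+s
--             case _:
-- #                if hand and "R" in s:
--                 if hand:
--                     if 'R' in s:
--                         cc=cc+"-"+s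
--                     elif 'R' in p:
--                         cc=cc+"-"+s
--                     else:
--                         cc=cc+s
--                 else:
--                     cc=cc+s
--                 hand=True
--         p=s
--     return cc
-- ===== SOURCE B (Python) =====
-- SPECIAL = ('(', ')', '=', '.')
--
--
-- def _split(src):
--     """Split src into segments: each special token is its own segment;
--     maximal runs of non-special tokens form one segment."""
--     segs = []
--     run = []
--     for s in src:
--         if s in SPECIAL:
--             if run:
--                 segs.append(run)
--                 run = []
--             segs.append([s])
--         else:
--             run.append(s)
--     if run:
--         segs.append(run)
--     return segs
--
--
-- def _join(seg):
--     """Join a run: '-' between neighbours when either contains 'R'."""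
--     piece = seg[0]
--     for prev, cur in zip(seg, seg[1:]):
--         piece += ("-" if ('R' in prev or 'R' in cur) else "") + cur
--     return piece
--
--
-- def xmerge(src):
--     if len(src) < 1:
--         return "Non"
--     if len(src) == 2:
--         return src[0] + "-" + src[1]
--     return "".join(_join(seg) for seg in _split(src))
-- ===== Notes on version B (the rewrite author's own statement) =====
-- stated objective: alternative
-- what changed: Replaced A's single-pass hand/p state machine with two staged recursive passes: first split the token list into segments (each special token '(' ')' '=' '.' alone, maximal runs of other tokens together), then join each run with '-' between neighbours when either contains 'R', and concatenate the segment strings.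
import Mathlib
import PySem

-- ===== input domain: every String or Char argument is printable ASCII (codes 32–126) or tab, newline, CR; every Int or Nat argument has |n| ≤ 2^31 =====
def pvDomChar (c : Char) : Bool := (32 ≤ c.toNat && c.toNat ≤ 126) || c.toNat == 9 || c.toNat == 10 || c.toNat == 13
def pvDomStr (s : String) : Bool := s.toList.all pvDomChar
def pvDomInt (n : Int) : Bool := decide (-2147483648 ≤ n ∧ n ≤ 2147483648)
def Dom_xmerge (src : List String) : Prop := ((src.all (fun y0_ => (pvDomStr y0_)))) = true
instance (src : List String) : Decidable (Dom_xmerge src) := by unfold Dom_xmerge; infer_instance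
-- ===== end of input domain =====

-- B replaces A's single-pass hand/p state machine by two staged passes:
-- split into segments (specials alone, maximal runs of others), then join each run (objective: alternative).

-- ===== PORT A =====
-- the 'for s in src' loop with state (hand, cc, p); the match's four special cases become an if-chain
def xmergeLoop : List String → Bool → String → String → String
  | [], _, cc, _ => cc
  | s :: rest, hand, cc, p =>
    if s = "(" then xmergeLoop rest false (cc ++ s) s
    else if s = ")" then xmergeLoop rest false (cc ++ s) s
    else if s = "=" then xmergeLoop rest false (cc ++ s) s
    else if s = "." then xmergeLoop rest false (cc ++ s) s
    else
      let cc' :=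
        if hand then
          if PySem.Str.isIn "R" s then cc ++ "-" ++ s
          else if PySem.Str.isIn "R" p then cc ++ "-" ++ s
          else cc ++ s
        else cc ++ s
      xmergeLoop rest true cc' s

def xmerge (src : List String) : String :=
  match src with
  | [] => "Non"                 -- len(src) < 1
  | [a, b] => a ++ "-" ++ b     -- len(src) == 2
  | _ => xmergeLoop src false "" ""

-- ===== PORT B =====
def xmergeSpecial : List String := ["(", ")", "=", "."]

-- _split's loop with state (segs, run)
def xsplitLoop : List String → List (List String) → List String → List (List String)
  | [], segs, run => if run.isEmpty then segs else segs ++ [run]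
  | s :: rest, segs, run =>
    if xmergeSpecial.contains s then
      xsplitLoop rest ((if run.isEmpty then segs else segs ++ [run]) ++ [[s]]) []
    else xsplitLoop rest segs (run ++ [s])

def xsplit (src : List String) : List (List String) := xsplitLoop src [] []

-- _join's loop body over zip(seg, seg[1:])
def xjoinStep (piece : String) (pc : String × String) : String :=
  piece ++ (if PySem.Str.isIn "R" pc.1 || PySem.Str.isIn "R" pc.2 then "-" else "") ++ pc.2

-- _join: called only on nonempty segments, so seg[0] is ported as headD ""
def xjoin (seg : List String) : String :=
  (seg.zip seg.tail).foldl xjoinStep (seg.headD "")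

-- "".join(_join(seg) for seg in _split(src))
def xjoinAll : List (List String) → String
  | [] => ""
  | seg :: segs => xjoin seg ++ xjoinAll segs

def xmerge_alt (src : List String) : String :=
  if src.length < 1 then "Non"
  else if src.length = 2 then src.headD "" ++ "-" ++ (src.tail.headD "")
  else xjoinAll (xsplit src)

-- ===== PRECONDITION & SPEC =====
def Spec_xmerge (src : List String) (out : String) : Prop := out = xmerge_alt src
instance (src : List String) (out : String) : Decidable (Spec_xmerge src out) := by unfold Spec_xmerge; infer_instance

-- ===== CLAIM (what is proved, stated in full; the proofs are below) =====
def Claim_equal_xmerge : Prop := ∀ (src : List String), Dom_xmerge src → Spec_xmerge src (xmerge src)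

-- ===== LEMMAS AND PROOFS =====

-- common recursive description of the output: prev = some p iff the previous token was processed with hand=true
def goA : Option String → List String → String
  | _, [] => ""
  | prev, s :: rest =>
    if xmergeSpecial.contains s then s ++ goA none rest
    else
      (match prev with
       | some p =>
         if PySem.Str.isIn "R" s then "-" else if PySem.Str.isIn "R" p then "-" else ""
       | none => "") ++ (s ++ goA (some s) rest)

theorem goA_cons (prev : Option String) (s : String) (l : List String) :
    goA prev (s :: l) =
      if xmergeSpecial.contains s then s ++ goA none l
      else
        (match prev with
         | some p =>
           if PySem.Str.isIn "R" s then "-" else if PySem.Str.isIn "R" p then "-" else ""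
         | none => "") ++ (s ++ goA (some s) l) := rfl

-- recursive reference versions of B's two stages (proof-side only)
def rsplit : List String → List (List String)
  | [] => []
  | s :: rest =>
    if xmergeSpecial.contains s then [s] :: rsplit rest
    else
      match rsplit rest with
      | [] => [[s]]
      | seg :: segs =>
        if xmergeSpecial.contains (seg.headD "") then [s] :: seg :: segs
        else (s :: seg) :: segs

def rjoin : List String → String
  | [] => ""
  | [a] => a
  | a :: b :: rest =>
      a ++ (if PySem.Str.isIn "R" a || PySem.Str.isIn "R" b then "-" else "") ++ rjoin (b :: rest)

def rjoinAll : List (List String) → String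
  | [] => ""
  | seg :: segs => rjoin seg ++ rjoinAll segs

theorem rsplit_cons (s : String) (l : List String) :
    rsplit (s :: l) =
      if xmergeSpecial.contains s then [s] :: rsplit l
      else
        match rsplit l with
        | [] => [[s]]
        | seg :: segs =>
          if xmergeSpecial.contains (seg.headD "") then [s] :: seg :: segs
          else (s :: seg) :: segs := rfl

theorem xmergeLoop_eq_goA (xs : List String) :
    ∀ (hand : Bool) (cc p : String),
      xmergeLoop xs hand cc p = cc ++ goA (if hand then some p else none) xs := by
  induction xs with
  | nil => intro hand cc p; cases hand <;> simp [xmergeLoop, goA]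
  | cons s rest ih =>
    intro hand cc p
    by_cases h1 : s = "("
    · subst h1; cases hand <;> simp [xmergeLoop, goA, xmergeSpecial, ih, String.append_assoc]
    · by_cases h2 : s = ")"
      · subst h2; cases hand <;> simp [xmergeLoop, goA, xmergeSpecial, ih, String.append_assoc]
      · by_cases h3 : s = "="
        · subst h3; cases hand <;> simp [xmergeLoop, goA, xmergeSpecial, ih, String.append_assoc]
        · by_cases h4 : s = "."
          · subst h4; cases hand <;> simp [xmergeLoop, goA, xmergeSpecial, ih, String.append_assoc]
          · have hs : s ∉ xmergeSpecial := by
              simp [xmergeSpecial, h1, h2, h3, h4]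
            cases hand <;>
              simp [xmergeLoop, goA, h1, h2, h3, h4, hs, ih, String.append_assoc] <;>
              (try (split_ifs <;> simp [String.append_assoc]))

-- the first segment of rsplit (s :: rest) always starts with s
theorem rsplit_cons_shape (s : String) (rest : List String) :
    ∃ seg segs, rsplit (s :: rest) = (s :: seg) :: segs := by
  by_cases h : xmergeSpecial.contains s = true
  · exact ⟨[], rsplit rest, by rw [rsplit_cons, if_pos h]⟩
  · match hr : rsplit rest with
    | [] => exact ⟨[], [], by rw [rsplit_cons, if_neg (by simpa using h), hr]⟩
    | seg :: segs =>
      by_cases h2 : xmergeSpecial.contains (seg.headD "") = true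
      · exact ⟨[], seg :: segs, by rw [rsplit_cons, if_neg (by simpa using h), hr]; exact if_pos h2⟩
      · exact ⟨seg, segs, by rw [rsplit_cons, if_neg (by simpa using h), hr]; exact if_neg h2⟩

-- separator contributed between p and the head of xs
def headSep (p : String) : List String → String
  | [] => ""
  | s :: _ =>
    if xmergeSpecial.contains s then ""
    else if PySem.Str.isIn "R" s then "-" else if PySem.Str.isIn "R" p then "-" else ""

theorem goA_some (p : String) (xs : List String) :
    goA (some p) xs = headSep p xs ++ goA none xs := by
  cases xs with
  | nil => simp [goA, headSep]
  | cons s rest =>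
    simp only [goA, headSep]
    split_ifs <;> simp [String.append_assoc]

theorem rjoinAll_rsplit (xs : List String) : rjoinAll (rsplit xs) = goA none xs := by
  induction xs with
  | nil => simp [rsplit, rjoinAll, goA]
  | cons s rest ih =>
    by_cases hs : xmergeSpecial.contains s = true
    · rw [rsplit_cons, if_pos hs, goA_cons, if_pos hs]
      simp only [rjoinAll, rjoin]
      rw [ih]
    · rw [rsplit_cons, if_neg (by simpa using hs), goA_cons, if_neg (by simpa using hs)]
      rw [goA_some s rest]
      cases rest with
      | nil =>
        simp [rsplit, rjoinAll, rjoin, goA, headSep]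
      | cons t rest' =>
        obtain ⟨seg, segs, hsplit⟩ := rsplit_cons_shape t rest'
        simp only [hsplit, List.headD_cons]
        by_cases ht : xmergeSpecial.contains t = true
        · rw [if_pos ht]
          have hih : rjoin (t :: seg) ++ rjoinAll segs = goA none (t :: rest') := by
            rw [← ih, hsplit]; rfl
          simp only [rjoinAll, rjoin, headSep, ht, if_pos]
          rw [hih]
          simp [String.append_assoc]
        · rw [if_neg (by simpa using ht)]
          have hih : rjoin (t :: seg) ++ rjoinAll segs = goA none (t :: rest') := by
            rw [← ih, hsplit]; rfl
          have hsep : (if PySem.Str.isIn "R" s || PySem.Str.isIn "R" t then "-" else "")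
              = headSep s (t :: rest') := by
            simp only [headSep, ht, Bool.false_eq_true, if_false]
            cases hrs : PySem.Str.isIn "R" s <;> cases hrt : PySem.Str.isIn "R" t <;> simp
          cases seg with
          | nil =>
            simp only [rjoinAll, rjoin, ← hsep]
            rw [← hih]
            simp [rjoinAll, rjoin, String.append_assoc]
          | cons u seg' =>
            simp only [rjoinAll, rjoin, ← hsep]
            rw [← hih]
            simp [rjoinAll, rjoin, String.append_assoc]

-- ---- bridge: the iterative split loop computes rsplit ----

-- attach a finished run in front of an already-split tail
def glue (run : List String) : List (List String) → List (List String)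
  | [] => [run]
  | seg :: segs =>
    if xmergeSpecial.contains (seg.headD "") then run :: seg :: segs
    else (run ++ seg) :: segs

theorem rsplit_cons_nonspecial (s : String) (l : List String)
    (hs : xmergeSpecial.contains s = false) :
    rsplit (s :: l) = glue [s] (rsplit l) := by
  rw [rsplit_cons, if_neg (by simpa using hs)]
  cases h : rsplit l with
  | nil => simp [glue]
  | cons seg segs =>
    by_cases h2 : xmergeSpecial.contains (seg.headD "") = true
    · simp [glue, h2]
    · simp [glue, h2]

theorem glue_snoc (run : List String) (s : String) (X : List (List String))
    (hs : xmergeSpecial.contains s = false) :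
    glue (run ++ [s]) X = glue run (glue [s] X) := by
  have hsm : s ∉ xmergeSpecial := by simpa using hs
  cases X with
  | nil => simp [glue, hsm]
  | cons seg segs =>
    by_cases h2 : seg.head?.getD "" ∈ xmergeSpecial
    · simp [glue, h2, hsm]
    · simp [glue, h2, hsm, List.append_assoc]

theorem xsplitLoop_eq (xs : List String) :
    ∀ (segs : List (List String)) (run : List String),
      xsplitLoop xs segs run
        = segs ++ (if run.isEmpty then rsplit xs else glue run (rsplit xs)) := by
  induction xs with
  | nil =>
    intro segs run
    cases run with
    | nil => simp [xsplitLoop, rsplit]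
    | cons a t => simp [xsplitLoop, rsplit, glue]
  | cons s rest ih =>
    intro segs run
    by_cases hs : xmergeSpecial.contains s = true
    · have hsm : s ∈ xmergeSpecial := by simpa using hs
      have hstep : xsplitLoop (s :: rest) segs run
          = xsplitLoop rest ((if run.isEmpty then segs else segs ++ [run]) ++ [[s]]) [] := by
        simp [xsplitLoop, hsm]
      rw [hstep, ih, rsplit_cons, if_pos hs]
      cases run with
      | nil => simp
      | cons a t => simp [glue, hsm]
    · have hs0 : xmergeSpecial.contains s = false := by simpa using hs
      have hsm : s ∉ xmergeSpecial := by simpa using hs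
      have hstep : xsplitLoop (s :: rest) segs run
          = xsplitLoop rest segs (run ++ [s]) := by
        simp [xsplitLoop, hsm]
      rw [hstep, ih, rsplit_cons_nonspecial s rest hs0]
      cases run with
      | nil => simp
      | cons a t =>
        have hg := glue_snoc (a :: t) s (rsplit rest) hs0
        simp only [List.cons_append] at hg
        simp [hg]

theorem xsplit_eq_rsplit (src : List String) : xsplit src = rsplit src := by
  rw [xsplit, xsplitLoop_eq]; simp

-- ---- bridge: the foldl join computes rjoin ----

def tailJoin (p : String) : List String → String
  | [] => ""
  | c :: rest => (if PySem.Str.isIn "R" p || PySem.Str.isIn "R" c then "-" else "") ++ c ++ tailJoin c rest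

theorem foldl_xjoinStep (xs : List String) :
    ∀ (a cc : String), ((a :: xs).zip xs).foldl xjoinStep cc = cc ++ tailJoin a xs := by
  induction xs with
  | nil => intro a cc; simp [tailJoin]
  | cons b r ih =>
    intro a cc
    simp only [List.zip_cons_cons, List.foldl_cons, xjoinStep, tailJoin]
    rw [ih]
    simp [String.append_assoc]

theorem rjoin_eq_tailJoin (xs : List String) :
    ∀ (a : String), rjoin (a :: xs) = a ++ tailJoin a xs := by
  induction xs with
  | nil => intro a; simp [rjoin, tailJoin]
  | cons b r ih =>
    intro a
    simp only [rjoin, tailJoin, ih b]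
    simp [String.append_assoc]

theorem xjoin_eq_rjoin (a : String) (xs : List String) :
    xjoin (a :: xs) = rjoin (a :: xs) := by
  simp only [xjoin, List.headD_cons, List.tail_cons]
  rw [foldl_xjoinStep, rjoin_eq_tailJoin]

-- every segment rsplit produces is nonempty
theorem rsplit_ne_nil (xs : List String) : ∀ seg ∈ rsplit xs, seg ≠ [] := by
  induction xs with
  | nil => simp [rsplit]
  | cons s rest ih =>
    intro seg hmem
    by_cases hs : xmergeSpecial.contains s = true
    · rw [rsplit_cons, if_pos hs] at hmem
      rcases List.mem_cons.mp hmem with h | h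
      · simp [h]
      · exact ih seg h
    · rw [rsplit_cons, if_neg (by simpa using hs)] at hmem
      rcases hr : rsplit rest with _ | ⟨seg', segs'⟩
      · rw [hr] at hmem; simp at hmem; simp [hmem]
      · rw [hr] at hmem
        have hmem' : seg ∈ (if xmergeSpecial.contains (seg'.headD "") = true
            then [s] :: seg' :: segs' else (s :: seg') :: segs') := hmem
        by_cases h2 : xmergeSpecial.contains (seg'.headD "") = true
        · rw [if_pos h2] at hmem'
          rcases List.mem_cons.mp hmem' with hm | hm
          · simp [hm]
          · exact ih seg (hr ▸ hm)
        · rw [if_neg h2] at hmem'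
          rcases List.mem_cons.mp hmem' with hm | hm
          · simp [hm]
          · exact ih seg (hr ▸ List.mem_cons_of_mem _ hm)

theorem joinAll_congr (L : List (List String)) (h : ∀ seg ∈ L, seg ≠ []) :
    xjoinAll L = rjoinAll L := by
  induction L with
  | nil => rfl
  | cons seg segs ih =>
    cases seg with
    | nil => exact absurd rfl (h [] (List.mem_cons_self))
    | cons a xs =>
      simp only [xjoinAll, rjoinAll, xjoin_eq_rjoin]
      rw [ih (fun s hs => h s (List.mem_cons_of_mem _ hs))]

theorem xjoinAll_xsplit (xs : List String) : xjoinAll (xsplit xs) = goA none xs := by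
  rw [xsplit_eq_rsplit, joinAll_congr _ (rsplit_ne_nil xs), rjoinAll_rsplit]

-- ===== VERDICT (by name: the statement is the Claim_ definition above) =====
theorem xmerge_spec : Claim_equal_xmerge := by
  unfold Claim_equal_xmerge
  intro src _
  unfold Spec_xmerge
  match src with
  | [] => rfl
  | [a, b] => simp [xmerge, xmerge_alt]
  | [a] =>
    have halt : xmerge_alt [a] = xjoinAll (xsplit [a]) := by simp [xmerge_alt]
    show xmergeLoop [a] false "" "" = xmerge_alt [a]
    rw [halt, xmergeLoop_eq_goA, xjoinAll_xsplit]; rfl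
  | a :: b :: c :: rest =>
    have halt : xmerge_alt (a :: b :: c :: rest)
        = xjoinAll (xsplit (a :: b :: c :: rest)) := by
      unfold xmerge_alt
      rw [if_neg (by simp), if_neg (by simp)]
    show xmergeLoop (a :: b :: c :: rest) false "" "" = xmerge_alt (a :: b :: c :: rest)
    rw [halt, xmergeLoop_eq_goA, xjoinAll_xsplit]; rfl
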